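-- pv_equiv track=rewrite | github.com/katiexu/HEILS_GVAE | FusionModel.py | qubit_fold
-- ===== SOURCE A (Python) =====
-- def shift_ith_element_right(original_list, i):
--     """
--     对列表中每个item的第i个元素进行循环右移一位
--
--     Args:
--         original_list: 原始列表，如 [[3, 0, 5], [4, 3, 6], [5, 1, 7], [1, 2, 8]]
--         i: 要循环右移的元素索引，如 i=1 表示第二个元素
--
--     """
--     ith_elements = [item[i] for item in original_list]
--     # 循环右移一位：最后一个元素移到开头
--     shifted_ith = [ith_elements[-1]] + ith_elements[:-1]
--     result = [item[:i] + [shifted_ith[idx]] + item[i+1:] for idx, item in enumerate(original_list)]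
--     return result
--
-- def qubit_fold(jobs, phase, fold=1):
--     if fold > 1:
--         job_list = []
--         for job in jobs:
--             if phase == 0:
--                 q = job[0]
--                 job_list += [[fold*(q-1)+1+i] + job[1:] for i in range(0, fold)]
--             else:
--                 job = [i-1 for i in job]
--                 q = job[0]
--                 indices = [i for i, x in enumerate(job) if x < q]
--                 enta = [[fold*j+i+1 for j in job] for i in range(0,fold)]
--                 for i in indices:
--                     enta = shift_ith_element_right(enta, i)
--                 job_list += enta
--     else:
--         job_list = jobs
--     return job_list
-- ===== SOURCE B (Python) =====
-- def qubit_fold(jobs, phase, fold=1):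
--     if fold <= 1:
--         return jobs
--     job_list = []
--     for job in jobs:
--         if phase == 0:
--             q = job[0]
--             for i in range(fold):
--                 job_list.append([fold * (q - 1) + 1 + i] + job[1:])
--         else:
--             q0 = job[0]
--             rotated = [x < q0 for x in job]
--             for r in range(fold):
--                 job_list.append([fold * (x - 1) + (((r - 1) % fold) if rot else r) + 1
--                                  for x, rot in zip(job, rotated)])
--     return job_list
-- ===== Notes on version B (the rewrite author's own statement) =====
-- stated objective: alternative
-- what changed: Instead of building the enta matrix and repeatedly rebuilding it with shift_ith_element_right for each affected column, B computes every cell directly in one pass with the closed form fold*(x-1) + ((r-1) % fold if x < job[0] else r) + 1, eliminating the helper and the per-index matrix rebuilds.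
import Mathlib
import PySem

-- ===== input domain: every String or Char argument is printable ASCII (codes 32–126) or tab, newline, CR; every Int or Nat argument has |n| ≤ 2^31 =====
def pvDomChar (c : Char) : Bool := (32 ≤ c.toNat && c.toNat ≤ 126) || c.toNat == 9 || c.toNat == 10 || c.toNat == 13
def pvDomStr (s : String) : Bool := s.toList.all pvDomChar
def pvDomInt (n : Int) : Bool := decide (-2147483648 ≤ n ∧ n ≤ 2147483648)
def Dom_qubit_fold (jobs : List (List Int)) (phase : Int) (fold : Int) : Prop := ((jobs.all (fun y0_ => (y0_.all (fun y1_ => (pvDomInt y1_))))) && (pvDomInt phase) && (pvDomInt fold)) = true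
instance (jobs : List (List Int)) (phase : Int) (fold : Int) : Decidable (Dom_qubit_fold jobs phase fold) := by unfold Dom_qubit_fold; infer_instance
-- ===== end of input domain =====

-- B replaces the repeated shift_ith_element_right matrix rebuilds by a one-pass closed-form
-- computation of every cell (alternative decomposition; equivalence is about the return value).

-- ===== PORT A =====
def shift_ith_element_right (original_list : List (List Int)) (i : Int) : List (List Int) :=
  let ith_elements := original_list.map (fun item => PySem.List.pyGetD item i 0)
  let shifted_ith := PySem.List.pyGetD ith_elements (-1) 0 :: PySem.List.slice ith_elements none (some (-1))
  (PySem.List.enumerate original_list 0).map (fun p =>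
    PySem.List.slice p.2 none (some i) ++ [PySem.List.pyGetD shifted_ith p.1 0] ++ PySem.List.slice p.2 (some (i+1)) none)

def qubit_fold (jobs : List (List Int)) (phase : Int) (fold : Int) : List (List Int) :=
  if fold > 1 then
    jobs.foldl (fun job_list job =>
      if phase = 0 then
        let q := PySem.List.pyGetD job 0 0
        job_list ++ (PySem.List.pyRange 0 fold 1).map (fun i => (fold*(q-1)+1+i) :: PySem.List.slice job (some 1) none)
      else
        let job1 := job.map (fun i => i - 1)
        let q := PySem.List.pyGetD job1 0 0
        let indices := (PySem.List.enumerate job1 0).filterMap (fun p => if p.2 < q then some p.1 else none)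
        let enta := (PySem.List.pyRange 0 fold 1).map (fun i => job1.map (fun j => fold*j+i+1))
        job_list ++ indices.foldl shift_ith_element_right enta) []
  else jobs

-- ===== PORT B =====
def qubit_fold_alt (jobs : List (List Int)) (phase : Int) (fold : Int) : List (List Int) :=
  if fold ≤ 1 then jobs
  else
    jobs.foldl (fun job_list job =>
      if phase = 0 then
        let q := PySem.List.pyGetD job 0 0
        (PySem.List.pyRange 0 fold 1).foldl (fun acc i =>
          acc ++ [(fold*(q-1)+1+i) :: PySem.List.slice job (some 1) none]) job_list
      else
        let q0 := PySem.List.pyGetD job 0 0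
        let rotated := job.map (fun x => decide (x < q0))
        (PySem.List.pyRange 0 fold 1).foldl (fun acc r =>
          acc ++ [(job.zip rotated).map (fun p =>
            fold*(p.1-1) + (if p.2 then PySem.Int.mod (r-1) fold else r) + 1)]) job_list) []

-- ===== PRECONDITION & SPEC =====
-- Pre_ excludes exactly the inputs where Python A raises IndexError: some empty job list
-- while fold > 1 (job[0] is read); B raises there as well.
def Pre_qubit_fold (jobs : List (List Int)) (phase : Int) (fold : Int) : Prop :=
  fold ≤ 1 ∨ ∀ job ∈ jobs, job ≠ []
instance (jobs : List (List Int)) (phase : Int) (fold : Int) : Decidable (Pre_qubit_fold jobs phase fold) := by unfold Pre_qubit_fold; infer_instance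

def pvWitness_qubit_fold : List (List Int) × Int × Int := ([[1, 2], [3, 1, 2]], 1, 2)

def Spec_qubit_fold (jobs : List (List Int)) (phase : Int) (fold : Int) (out : List (List Int)) : Prop := out = qubit_fold_alt jobs phase fold
instance (jobs : List (List Int)) (phase : Int) (fold : Int) (out : List (List Int)) : Decidable (Spec_qubit_fold jobs phase fold out) := by unfold Spec_qubit_fold; infer_instance

-- ===== CLAIM (what is proved, stated in full; the proofs are below) =====
def Claim_equal_qubit_fold : Prop := ∀ (jobs : List (List Int)) (phase : Int) (fold : Int), Dom_qubit_fold jobs phase fold → Pre_qubit_fold jobs phase fold → Spec_qubit_fold jobs phase fold (qubit_fold jobs phase fold)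

-- ===== LEMMAS AND PROOFS =====

-- the enta matrix after the columns listed in T have been right-rotated, written positionally
def Mrows (fold : Int) (L : List Int) (T : List Int) : List (List Int) :=
  (PySem.List.pyRange 0 fold 1).map (fun r =>
    (PySem.List.enumerate L 0).map (fun p =>
      fold * p.2 + (if p.1 ∈ T then PySem.Int.mod (r-1) fold else r) + 1))

theorem enum_map_f {A B : Type} (f : A → B) (l : List A) (s : Int) :
    PySem.List.enumerate (l.map f) s = (PySem.List.enumerate l s).map (fun p => (p.1, f p.2)) := by
  induction l generalizing s with
  | nil => simp [PySem.List.enumerate_nil]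
  | cons x xs ih => simp [PySem.List.enumerate_cons, ih]

theorem enum_snd_map {A B : Type} (f : A → B) (l : List A) (s : Int) :
    (PySem.List.enumerate l s).map (fun p => f p.2) = l.map f := by
  induction l generalizing s with
  | nil => simp [PySem.List.enumerate_nil]
  | cons x xs ih => simp [PySem.List.enumerate_cons, ih]

theorem enum_take {A : Type} (l : List A) (s : Int) (k : Nat) :
    (PySem.List.enumerate l s).take k = PySem.List.enumerate (l.take k) s := by
  induction l generalizing s k with
  | nil => simp [PySem.List.enumerate_nil]
  | cons x xs ih =>
    cases k with
    | zero => simp [PySem.List.enumerate_nil]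
    | succ k => simp [PySem.List.enumerate_cons, ih]

theorem enum_drop {A : Type} (l : List A) (s : Int) (k : Nat) :
    (PySem.List.enumerate l s).drop k = PySem.List.enumerate (l.drop k) (s + k) := by
  induction l generalizing s k with
  | nil => simp [PySem.List.enumerate_nil]
  | cons x xs ih =>
    cases k with
    | zero => simp
    | succ k =>
      rw [PySem.List.enumerate_cons]
      simp only [List.drop_succ_cons, ih]
      congr 1
      push_cast
      ring

theorem enum_range_nat (n : Nat) :
    PySem.List.enumerate (List.range n) 0 = (List.range n).map (fun (j : Nat) => ((j:Int), j)) := by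
  induction n with
  | zero => simp [PySem.List.enumerate_nil]
  | succ n ih =>
    rw [List.range_succ, PySem.List.enumerate_append, ih, List.map_append]
    simp [PySem.List.enumerate_cons, PySem.List.enumerate_nil]

theorem zip_self_map {A B : Type} (l : List A) (f : A → B) :
    l.zip (l.map f) = l.map (fun x => (x, f x)) := by
  induction l with
  | nil => rfl
  | cons x xs ih => simp [ih]

theorem Mrows_congr (fold : Int) (L : List Int) (T T' : List Int)
    (h : ∀ x, x ∈ T ↔ x ∈ T') : Mrows fold L T = Mrows fold L T' := by
  unfold Mrows
  refine List.map_congr_left (fun r _ => List.map_congr_left (fun p _ => ?_))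
  simp [h]

theorem Mrows_nil (fold : Int) (L : List Int) :
    Mrows fold L [] = (PySem.List.pyRange 0 fold 1).map (fun i => L.map (fun j => fold*j+i+1)) := by
  unfold Mrows
  refine List.map_congr_left (fun r _ => ?_)
  simp only [List.not_mem_nil, if_false]
  exact enum_snd_map (fun j => fold*j+r+1) L 0

theorem shift_step (n : Nat) (hn2 : 2 ≤ n) (L : List Int) (T : List Int)
    (k : Nat) (hk : k < L.length) (hkT : (k : Int) ∉ T) :
    shift_ith_element_right (Mrows (n : Int) L T) (k : Int) = Mrows (n : Int) L ((k : Int) :: T) := by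
  have hrange : PySem.List.pyRange 0 (n:Int) 1 = (List.range n).map (fun (j : Nat) => (j : Int)) := by
    rw [PySem.List.pyRange_one]; simp
  have hmodnat : ∀ j : Nat, j < n → PySem.Int.mod ((j:Int)) (n:Int) = (j:Int) := by
    intro j hj
    rw [PySem.Int.mod_eq_emod_of_pos (by omega)]
    exact Int.emod_eq_of_lt (by omega) (by omega)
  have hmodneg : PySem.Int.mod (-1) (n:Int) = (n:Int) - 1 := by
    rw [PySem.Int.mod_eq_emod_of_pos (by omega)]
    have h2 := Int.add_mul_emod_self_left (a := (n:Int)-1) (b := (n:Int)) (c := -1)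
    have h3 : ((n:Int)-1) % (n:Int) = (n:Int)-1 := Int.emod_eq_of_lt (by omega) (by omega)
    rw [show (-1 : Int) = ((n:Int)-1 + (n:Int)*(-1)) by ring, h2, h3]
  -- column k of Mrows T, as a list over the rows
  have h1 : ((Mrows (n:Int) L T).map (fun item => PySem.List.pyGetD item (k : Int) 0))
      = (PySem.List.pyRange 0 (n:Int) 1).map (fun r => (n:Int) * (L[k]'hk) + r + 1) := by
    unfold Mrows
    rw [List.map_map]
    refine List.map_congr_left (fun r hr => ?_)
    show PySem.List.pyGetD ((PySem.List.enumerate L 0).map _) (k:Int) 0 = _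
    rw [PySem.List.pyGetD_natCast, List.getD_eq_getElem?_getD, List.getElem?_map,
      PySem.List.getElem?_enumerate]
    simp [List.getElem?_eq_getElem hk, hkT]
  -- the rotated column, closed form
  have hshift : ∀ c : Int,
      (PySem.List.pyGetD ((PySem.List.pyRange 0 (n:Int) 1).map (fun r => (n:Int)*c + r + 1)) (-1) 0
        :: PySem.List.slice ((PySem.List.pyRange 0 (n:Int) 1).map (fun r => (n:Int)*c + r + 1)) none (some (-1)))
      = (PySem.List.pyRange 0 (n:Int) 1).map (fun r => (n:Int)*c + PySem.Int.mod (r-1) (n:Int) + 1) := by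
    intro c
    rw [hrange, List.map_map, List.map_map, PySem.List.slice_to_neg_one]
    apply List.ext_getElem
    · simp; omega
    · intro m hm1 hm2
      cases m with
      | zero =>
        rw [List.getElem_cons_zero,
          PySem.List.pyGetD_neg_ofNat _ 1 0 (by omega) (by simp; omega)]
        simp only [List.length_map, List.length_range, List.getElem_map, List.getElem_range,
          Function.comp_apply]
        rw [show (((n-1 : Nat)):Int) = (n:Int) - 1 by omega]
        rw [show (((0:Nat)):Int) - 1 = -1 by simp, hmodneg]
      | succ m =>
        simp only [List.length_cons, List.length_dropLast, List.length_map, List.length_range] at hm1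
        simp only [List.getElem_cons_succ, List.getElem_dropLast, List.getElem_map,
          List.getElem_range, Function.comp_apply]
        rw [show (((m+1 : Nat)):Int) - 1 = (m:Int) by push_cast; ring, hmodnat m (by omega)]
  -- assemble
  simp only [shift_ith_element_right, h1, hshift]
  unfold Mrows
  simp only [hrange, enum_map_f, enum_range_nat, List.map_map]
  refine List.map_congr_left (fun j hj => ?_)
  have hjn : j < n := List.mem_range.mp hj
  simp only [Function.comp_apply]
  -- middle value
  rw [PySem.List.pyGetD_natCast, List.getD_eq_getElem?_getD,
    List.getElem?_eq_getElem (by simpa using hjn)]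
  simp only [List.getElem_map, List.getElem_range, Option.getD_some, Function.comp_apply]
  -- slices to take/drop
  rw [PySem.List.slice_to_natCast,
    show ((k:Int) + 1) = (((k+1 : Nat)):Int) by push_cast; ring,
    PySem.List.slice_from_natCast,
    ← List.map_take, ← List.map_drop, enum_take, enum_drop]
  -- split the RHS enumeration at column k
  have hd : L.drop k = L[k]'hk :: L.drop (k+1) := by
    rw [List.getElem_cons_drop]
  have hL : L = L.take k ++ L[k]'hk :: L.drop (k+1) := by
    conv_lhs => rw [← List.take_append_drop k L, hd]
  conv_rhs => rw [hL]
  rw [PySem.List.enumerate_append, PySem.List.enumerate_cons, List.map_append, List.map_cons]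
  have hlt : (L.take k).length = k := by simp [List.length_take]; omega
  rw [List.append_assoc, List.singleton_append]
  refine congrArg₂ (· ++ ·) ?_ (congrArg₂ (· :: ·) ?_ ?_)
  · -- columns before k are unchanged
    refine List.map_congr_left (fun p hp => ?_)
    rw [PySem.List.mem_enumerate_iff] at hp
    obtain ⟨i, hi, rfl⟩ := hp
    have hik : i < k := by simp [List.length_take] at hi; omega
    have hm' : ((0:Int)+(i:Int) = (k:Int)) = False := eq_false (by omega)
    simp only [List.mem_cons, hm', false_or]
  · -- the rotated column k itself
    simp only [hlt]
    simp [List.mem_cons]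
  · -- columns after k are unchanged
    rw [show ((0:Int) + (((k+1:Nat)):Int)) = (0:Int) + (((L.take k).length:Int)) + 1 by
      rw [hlt]; push_cast; ring]
    refine List.map_congr_left (fun p hp => ?_)
    rw [PySem.List.mem_enumerate_iff] at hp
    obtain ⟨i, hi, rfl⟩ := hp
    have hm' : ((0:Int) + (((L.take k).length:Int)) + 1 + (i:Int) = (k:Int)) = False :=
      eq_false (by rw [hlt]; omega)
    simp only [List.mem_cons, hm', false_or]

theorem foldl_shifts (n : Nat) (hn2 : 2 ≤ n) (L : List Int) :
    ∀ (is T : List Int),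
      (∀ i ∈ is, ∃ k : Nat, i = (k : Int) ∧ k < L.length) → is.Nodup → (∀ i ∈ is, i ∉ T) →
      is.foldl shift_ith_element_right (Mrows (n:Int) L T) = Mrows (n:Int) L (is.reverse ++ T) := by
  intro is
  induction is with
  | nil => intro T _ _ _; simp
  | cons i is ih =>
    intro T hmem hnd hT
    obtain ⟨k, rfl, hk⟩ := hmem i (List.mem_cons_self ..)
    rw [List.foldl_cons, shift_step n hn2 L T k hk (hT _ (List.mem_cons_self ..)),
      ih ((k:Int) :: T) (fun j hj => hmem j (List.mem_cons_of_mem _ hj)) hnd.of_cons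
        (fun j hj => by
          rcases List.nodup_cons.mp hnd with ⟨hki, _⟩
          simp only [List.mem_cons, not_or]
          exact ⟨fun h => hki (h ▸ hj), hT j (List.mem_cons_of_mem _ hj)⟩)]
    exact Mrows_congr _ _ _ _ (fun x => by
      simp only [List.mem_append, List.mem_reverse, List.mem_cons]
      tauto)

theorem core (fold : Int) (hf : 1 < fold) (job : List Int) (hne : job ≠ []) :
    ((PySem.List.enumerate (job.map (fun i => i - 1)) 0).filterMap
        (fun p => if p.2 < PySem.List.pyGetD (job.map (fun i => i - 1)) 0 0 then some p.1 else none)).foldl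
      shift_ith_element_right
      ((PySem.List.pyRange 0 fold 1).map (fun i => (job.map (fun i => i - 1)).map (fun j => fold*j+i+1)))
    = (PySem.List.pyRange 0 fold 1).map (fun r =>
        (job.zip (job.map (fun x => decide (x < PySem.List.pyGetD job 0 0)))).map (fun p =>
          fold*(p.1-1) + (if p.2 then PySem.Int.mod (r-1) fold else r) + 1)) := by
  obtain ⟨n, rfl⟩ : ∃ n : Nat, fold = (n:Int) := ⟨fold.toNat, (Int.toNat_of_nonneg (by omega)).symm⟩
  have hn2 : 2 ≤ n := by
    have : 1 < n := by exact_mod_cast hf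
    omega
  obtain ⟨a, t, rfl⟩ : ∃ a t, job = a :: t := by
    cases job with
    | nil => exact absurd rfl hne
    | cons a t => exact ⟨a, t, rfl⟩
  set L := (a :: t).map (fun i => i - 1) with hLdef
  have hq : PySem.List.pyGetD L 0 0 = a - 1 := by
    rw [hLdef]; simp [PySem.List.pyGetD_zero_cons]
  have hq0 : PySem.List.pyGetD (a :: t) 0 0 = a := by simp [PySem.List.pyGetD_zero_cons]
  rw [hq, hq0]
  set indices := (PySem.List.enumerate L 0).filterMap
    (fun p => if p.2 < a - 1 then some p.1 else none) with hidx
  have hmem : ∀ i ∈ indices, ∃ k : Nat, i = (k:Int) ∧ k < L.length := by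
    intro i hi
    rw [hidx, List.mem_filterMap] at hi
    obtain ⟨p, hp, hsome⟩ := hi
    rw [PySem.List.mem_enumerate_iff] at hp
    obtain ⟨j, hj, rfl⟩ := hp
    split at hsome
    · refine ⟨j, ?_, hj⟩
      have := Option.some.inj hsome
      omega
    · exact absurd hsome (by simp)
  have hnd : indices.Nodup := by
    have hpw : indices.Pairwise (· < ·) := by
      rw [hidx, List.pairwise_filterMap]
      have hpe : (PySem.List.enumerate L 0).Pairwise (fun p q => p.1 < q.1) :=
        PySem.List.pairwise_lt_enumerate ..
      refine hpe.imp ?_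
      intro p p' hlt b hb b' hb'
      split at hb <;> simp at hb
      split at hb' <;> simp at hb'
      subst hb; subst hb'; exact hlt
    exact hpw.imp (fun h => ne_of_lt h)
  rw [← Mrows_nil, foldl_shifts n hn2 L indices [] hmem hnd (by simp),
    Mrows_congr (n:Int) L (indices.reverse ++ []) indices (by simp)]
  -- now compare rows pointwise
  unfold Mrows
  refine List.map_congr_left (fun r _ => ?_)
  rw [zip_self_map, List.map_map]
  have hiff : ∀ p ∈ PySem.List.enumerate L 0, (p.1 ∈ indices ↔ p.2 < a - 1) := by
    intro p hp
    have hp0 := hp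
    rw [PySem.List.mem_enumerate_iff] at hp
    obtain ⟨j, hj, rfl⟩ := hp
    constructor
    · intro hin
      rw [hidx, List.mem_filterMap] at hin
      obtain ⟨p', hp', hsome⟩ := hin
      rw [PySem.List.mem_enumerate_iff] at hp'
      obtain ⟨j', hj', rfl⟩ := hp'
      split at hsome
      · rename_i hcond
        have hjj : j' = j := by
          have := Option.some.inj hsome
          omega
        subst hjj
        exact hcond
      · exact absurd hsome (by simp)
    · intro hlt
      rw [hidx, List.mem_filterMap]
      exact ⟨(0 + (j:Int), L[j]'hj), hp0, by simp [hlt]⟩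
  calc (PySem.List.enumerate L 0).map
        (fun p => (n:Int)*p.2 + (if p.1 ∈ indices then PySem.Int.mod (r-1) (n:Int) else r) + 1)
      = (PySem.List.enumerate L 0).map
        (fun p => (n:Int)*p.2 + (if p.2 < a - 1 then PySem.Int.mod (r-1) (n:Int) else r) + 1) := by
        refine List.map_congr_left (fun p hp => ?_)
        rw [if_congr (hiff p hp) rfl rfl]
    _ = L.map (fun v => (n:Int)*v + (if v < a - 1 then PySem.Int.mod (r-1) (n:Int) else r) + 1) :=
        enum_snd_map (fun v => (n:Int)*v + (if v < a - 1 then PySem.Int.mod (r-1) (n:Int) else r) + 1) L 0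
    _ = (a::t).map (fun x =>
          (n:Int)*(x-1) + (if decide (x < a) = true then PySem.Int.mod (r-1) (n:Int) else r) + 1) := by
        rw [hLdef, List.map_map]
        refine List.map_congr_left (fun x _ => ?_)
        simp only [Function.comp_apply]
        by_cases hxa : x < a
        · rw [if_pos (by omega), if_pos (by simp [hxa])]
        · rw [if_neg (by omega), if_neg (by simp [hxa])]
    _ = (a::t).map ((fun p : Int × Bool =>
          (n:Int)*(p.1-1) + (if p.2 then PySem.Int.mod (r-1) (n:Int) else r) + 1)
            ∘ (fun x => (x, decide (x < a)))) := rfl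

-- ===== VERDICT (by name: the statement is the Claim_ definition above) =====
theorem qubit_fold_spec : Claim_equal_qubit_fold := by
  intro jobs phase fold _ hpre
  unfold Spec_qubit_fold qubit_fold qubit_fold_alt
  by_cases hf : fold ≤ 1
  · rw [if_neg (by omega : ¬ fold > 1), if_pos hf]
  · have hf1 : (1:Int) < fold := by omega
    rw [if_pos (by omega : fold > 1), if_neg hf]
    have hjobs : ∀ job ∈ jobs, job ≠ [] := hpre.resolve_left hf
    apply PySem.List.foldl_congr_mem'
    intro job hjob acc
    by_cases hp : phase = 0
    · simp only [if_pos hp, PySem.List.foldl_append_singleton_eq_map]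
    · simp only [if_neg hp, PySem.List.foldl_append_singleton_eq_map]
      rw [core fold hf1 job (hjobs job hjob)]
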